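-- pv_equiv track=rewrite | github.com/wno-git/aoc2018 | task4_1.py | get_guard_sleep_totals
-- ===== SOURCE A (Python) =====
-- from functools import reduce
-- from itertools import groupby
--
-- def kv_guard_id(kv):
--     return kv[0]
--
-- def kv_sleep(kv):
--     return kv[1]
--
-- def get_guard_sleep_totals(sleeps):
--     assert isinstance(sleeps, list)
--
--     sleeps = sorted(sleeps, key=kv_guard_id)
--
--     add_sleeps = lambda a, b: [ sum(x) for x in zip(a, b) ]
--
--     # this is basically a reduce-by-key
--     totals = [
--         (guard, reduce(add_sleeps, map(kv_sleep, guard_sleeps)))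
--             for guard, guard_sleeps in
--                 groupby(sleeps, key=kv_guard_id)
--     ]
--
--     return totals
-- ===== SOURCE B (Python) =====
-- def get_guard_sleep_totals(sleeps):
--     assert isinstance(sleeps, list)
--     acc = {}
--     for guard, sleep in sleeps:
--         if guard in acc:
--             acc[guard] = [x + y for x, y in zip(acc[guard], sleep)]
--         else:
--             acc[guard] = sleep
--     return [(g, acc[g]) for g in sorted(acc)]
-- ===== Notes on version B (the rewrite author's own statement) =====
-- stated objective: idiomatic
-- what changed: Replaces A's sort/groupby/reduce pipeline with a single dict-accumulating pass over the unsorted input (zip-summing per guard), followed by sorting the guard ids for the output.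
import Mathlib
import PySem

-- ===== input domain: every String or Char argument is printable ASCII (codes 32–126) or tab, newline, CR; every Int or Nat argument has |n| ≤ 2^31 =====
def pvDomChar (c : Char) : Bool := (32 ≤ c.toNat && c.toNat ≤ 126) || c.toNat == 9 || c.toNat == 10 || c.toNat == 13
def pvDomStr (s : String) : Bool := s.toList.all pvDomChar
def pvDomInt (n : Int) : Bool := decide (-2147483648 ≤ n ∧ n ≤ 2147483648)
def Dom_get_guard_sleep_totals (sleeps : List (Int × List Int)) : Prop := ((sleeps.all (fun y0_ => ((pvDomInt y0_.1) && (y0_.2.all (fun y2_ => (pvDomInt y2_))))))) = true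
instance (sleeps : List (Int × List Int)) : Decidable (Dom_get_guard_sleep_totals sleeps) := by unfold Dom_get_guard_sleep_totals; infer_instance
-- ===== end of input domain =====

-- B replaces A's sort/groupby/reduce pipeline with one dict-accumulating pass plus a sort of the guard ids (objective: idiomatic).

-- ===== PORT A =====
-- add_sleeps = lambda a, b: [ sum(x) for x in zip(a, b) ]
def pvAddSleeps (a b : List Int) : List Int := (a.zip b).map (fun x => x.1 + x.2)

-- itertools.groupby(xs, key=fst): consecutive runs of equal keys
def pvGroupby (xs : List (Int × List Int)) : List (Int × List (Int × List Int)) :=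
  match xs with
  | [] => []
  | x :: rest =>
      (x.1, x :: rest.takeWhile (fun y => y.1 == x.1)) ::
        pvGroupby (rest.dropWhile (fun y => y.1 == x.1))
termination_by xs.length
decreasing_by
  simp only [List.length_cons]
  have := List.length_dropWhile_le (fun y => y.1 == x.1) rest
  omega

-- reduce(add_sleeps, ms) with no initializer; groupby groups are never empty, so the [] case is unreachable
def pvReduceAdd (ms : List (List Int)) : List Int :=
  match ms with | [] => [] | h :: t => t.foldl pvAddSleeps h

def get_guard_sleep_totals (sleeps : List (Int × List Int)) : List (Int × List Int) :=
  let s := PySem.List.sorted sleeps (fun kv => kv.1) false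
  (pvGroupby s).map (fun gp => (gp.1, pvReduceAdd (gp.2.map (fun kv => kv.2))))

-- ===== PORT B =====
-- loop body: acc[guard] = zip-sum if guard already present, else the first sleep list
def pvStepB (d : PySem.Dict Int (List Int)) (p : Int × List Int) : PySem.Dict Int (List Int) :=
  if d.contains p.1 then
    d.insert p.1 (((d.getD p.1 []).zip p.2).map (fun q => q.1 + q.2))
  else
    d.insert p.1 p.2

def get_guard_sleep_totals_alt (sleeps : List (Int × List Int)) : List (Int × List Int) :=
  let acc := sleeps.foldl pvStepB PySem.Dict.empty
  (PySem.List.sorted acc.keys (fun g => g) false).map (fun g => (g, acc.getD g []))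

-- ===== PRECONDITION & SPEC =====
def Spec_get_guard_sleep_totals (sleeps : List (Int × List Int)) (out : List (Int × List Int)) : Prop := out = get_guard_sleep_totals_alt sleeps
instance (sleeps : List (Int × List Int)) (out : List (Int × List Int)) : Decidable (Spec_get_guard_sleep_totals sleeps out) := by unfold Spec_get_guard_sleep_totals; infer_instance

-- ===== CLAIM (what is proved, stated in full; the proofs are below) =====
def Claim_equal_get_guard_sleep_totals : Prop := ∀ (sleeps : List (Int × List Int)), Dom_get_guard_sleep_totals sleeps → Spec_get_guard_sleep_totals sleeps (get_guard_sleep_totals sleeps)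

-- ===== LEMMAS AND PROOFS =====

-- one accumulation step on an optional running total (reduce-by-key semantics shared by both sides)
def pvStepO (o : Option (List Int)) (s : List Int) : Option (List Int) :=
  some (match o with | none => s | some a => pvAddSleeps a s)

lemma pvAddSleeps_nil_right (a : List Int) : pvAddSleeps a [] = [] := by
  cases a <;> simp [pvAddSleeps]

lemma pvAddSleeps_lcomm : ∀ a b c : List Int,
    pvAddSleeps (pvAddSleeps a b) c = pvAddSleeps (pvAddSleeps a c) b := by
  intro a
  induction a with
  | nil => intro b c; simp [pvAddSleeps]
  | cons x a ih =>
    intro b c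
    cases b with
    | nil => rw [pvAddSleeps_nil_right, pvAddSleeps_nil_right]; simp [pvAddSleeps]
    | cons y b =>
      cases c with
      | nil => rw [pvAddSleeps_nil_right, pvAddSleeps_nil_right]; simp [pvAddSleeps]
      | cons z c =>
        simp only [pvAddSleeps, List.zip_cons_cons, List.map_cons] at *
        refine congrArg₂ _ (by ring) ?_
        simpa [pvAddSleeps] using ih b c

lemma pvAddSleeps_comm : ∀ a b : List Int, pvAddSleeps a b = pvAddSleeps b a := by
  intro a
  induction a with
  | nil => intro b; cases b <;> simp [pvAddSleeps]
  | cons x a ih =>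
    intro b
    cases b with
    | nil => simp [pvAddSleeps]
    | cons y b =>
      simp only [pvAddSleeps, List.zip_cons_cons, List.map_cons]
      refine congrArg₂ _ (by ring) ?_
      simpa [pvAddSleeps] using ih b

lemma pvStepO_lcomm (o : Option (List Int)) (b c : List Int) :
    pvStepO (pvStepO o b) c = pvStepO (pvStepO o c) b := by
  cases o with
  | none => simp [pvStepO, pvAddSleeps_comm b c]
  | some a => simp [pvStepO, pvAddSleeps_lcomm a b c]

-- ---- B side: the dict after the fold ----

lemma pvStepB_get?_self (d : PySem.Dict Int (List Int)) (p : Int × List Int) :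
    (pvStepB d p).get? p.1 = pvStepO (d.get? p.1) p.2 := by
  unfold pvStepB
  by_cases hc : d.contains p.1 = true
  · have hs : (d.get? p.1).isSome := by rw [← PySem.Dict.contains_eq_isSome_get?]; exact hc
    obtain ⟨a, ha⟩ := Option.isSome_iff_exists.mp hs
    simp [hc, PySem.Dict.get?_insert_self, pvStepO, ha,
      PySem.Dict.getD_eq_get?_getD, pvAddSleeps]
  · have hn : d.get? p.1 = none := by
      cases h : d.get? p.1 with
      | none => rfl
      | some a => exact absurd (by rw [PySem.Dict.contains_eq_isSome_get?, h]; rfl) hc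
    simp [hc, PySem.Dict.get?_insert_self, pvStepO, hn]

lemma pvStepB_get?_ne (d : PySem.Dict Int (List Int)) (p : Int × List Int) (g : Int)
    (h : g ≠ p.1) : (pvStepB d p).get? g = d.get? g := by
  unfold pvStepB
  split <;> exact PySem.Dict.get?_insert_of_ne _ _ h

lemma pvFold_get? : ∀ (l : List (Int × List Int)) (d : PySem.Dict Int (List Int)) (g : Int),
    (l.foldl pvStepB d).get? g =
      ((l.filter (fun p => p.1 == g)).map (fun p => p.2)).foldl pvStepO (d.get? g) := by
  intro l
  induction l with
  | nil => intro d g; simp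
  | cons p l ih =>
    intro d g
    by_cases hg : p.1 = g
    · simp only [List.foldl_cons, List.filter_cons, hg, beq_self_eq_true, if_pos,
        List.map_cons]
      rw [ih, ← hg, pvStepB_get?_self]
    · have hbe : (p.1 == g) = false := beq_eq_false_iff_ne.mpr hg
      simp only [List.foldl_cons, List.filter_cons, hbe, Bool.false_eq_true, if_neg,
        not_false_eq_true]
      rw [ih, pvStepB_get?_ne d p g (Ne.symm hg)]

lemma pvFold_keys (l : List (Int × List Int)) :
    (l.foldl pvStepB PySem.Dict.empty).keys = PySem.Set.ofList (l.map (fun p => p.1)) := by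
  have h : pvStepB = fun d (p : Int × List Int) =>
      d.insert p.1 (if d.contains p.1 then
        ((d.getD p.1 []).zip p.2).map (fun q => q.1 + q.2) else p.2) := by
    funext d p; unfold pvStepB; split <;> rfl
  rw [h, PySem.Dict.keys_foldl_insert_key l (fun p => p.1) _ PySem.Dict.empty,
    PySem.Dict.keys_empty]
  rfl

-- the per-guard total, computed from the original (unsorted) input
def pvVal (sleeps : List (Int × List Int)) (g : Int) : List Int :=
  (((sleeps.filter (fun p => p.1 == g)).map (fun p => p.2)).foldl pvStepO none).getD []

lemma B_eq_canon (sleeps : List (Int × List Int)) :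
    get_guard_sleep_totals_alt sleeps =
      (PySem.List.sorted (PySem.Set.ofList (sleeps.map (fun p => p.1))) (fun g => g) false).map
        (fun g => (g, pvVal sleeps g)) := by
  have hB : get_guard_sleep_totals_alt sleeps =
      (PySem.List.sorted (sleeps.foldl pvStepB PySem.Dict.empty).keys (fun g => g) false).map
        (fun g => (g, (sleeps.foldl pvStepB PySem.Dict.empty).getD g [])) := rfl
  rw [hB, pvFold_keys]
  refine List.map_congr_left (fun g _ => ?_)
  rw [PySem.Dict.getD_eq_get?_getD, pvFold_get?]
  rfl

-- ---- A side: sorted + groupby over a key-sorted list ----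

lemma pvSplit : ∀ (rest : List (Int × List Int)) (k : Int),
    rest.Pairwise (fun a b => a.1 ≤ b.1) → (∀ p ∈ rest, k ≤ p.1) →
    (∀ p ∈ rest.takeWhile (fun y => y.1 == k), p.1 = k) ∧
    (∀ p ∈ rest.dropWhile (fun y => y.1 == k), k < p.1) := by
  intro rest
  induction rest with
  | nil => intro k _ _; simp
  | cons y rest ih =>
    intro k hpw hge
    have hpw' := List.Pairwise.of_cons hpw
    by_cases hy : y.1 = k
    · have hbe : (y.1 == k) = true := beq_iff_eq.mpr hy
      obtain ⟨h1, h2⟩ := ih k hpw' (fun p hp => hge p (List.mem_cons_of_mem _ hp))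
      constructor
      · intro p hp
        rw [List.takeWhile_cons, hbe] at hp
        rcases List.mem_cons.mp hp with h | h
        · rw [h]; exact hy
        · exact h1 p h
      · intro p hp
        rw [List.dropWhile_cons, hbe] at hp
        exact h2 p hp
    · have hbe : (y.1 == k) = false := beq_eq_false_iff_ne.mpr hy
      have hk : k < y.1 := lt_of_le_of_ne (hge y (List.mem_cons_self)) (Ne.symm hy)
      constructor
      · intro p hp; rw [List.takeWhile_cons, hbe] at hp; simp at hp
      · intro p hp
        rw [List.dropWhile_cons, hbe] at hp
        rcases List.mem_cons.mp hp with h | h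
        · rw [h]; exact hk
        · have := (List.pairwise_cons.mp hpw).1 p h
          exact lt_of_lt_of_le hk this

lemma pvSetUpdate_noop : ∀ (l : List Int) (s : PySem.Set Int),
    (∀ a ∈ l, s.contains a = true) → PySem.Set.update s l = s := by
  intro l
  induction l with
  | nil => intro s _; rfl
  | cons a l ih =>
    intro s h
    have ha : PySem.Set.add s a = s := by
      have hm : a ∈ s := by simpa using h a List.mem_cons_self
      simp [PySem.Set.add, hm]
    calc PySem.Set.update s (a :: l) = PySem.Set.update (PySem.Set.add s a) l := rfl
      _ = PySem.Set.update s l := by rw [ha]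
      _ = s := ih s (fun b hb => h b (List.mem_cons_of_mem _ hb))

lemma pvSetUpdate_cons : ∀ (l : List Int) (x : Int) (s : PySem.Set Int),
    (∀ a ∈ l, a ≠ x) → PySem.Set.update (x :: s) l = x :: PySem.Set.update s l := by
  intro l
  induction l with
  | nil => intro x s _; rfl
  | cons a l ih =>
    intro x s h
    have hne : a ≠ x := h a (List.mem_cons_self)
    have hadd : PySem.Set.add (x :: s) a = x :: PySem.Set.add s a := by
      by_cases hm : a ∈ s
      · simp [PySem.Set.add, hm, hne]
      · simp [PySem.Set.add, hm, hne]
    calc PySem.Set.update (x :: s) (a :: l)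
        = PySem.Set.update (PySem.Set.add (x :: s) a) l := rfl
      _ = PySem.Set.update (x :: PySem.Set.add s a) l := by rw [hadd]
      _ = x :: PySem.Set.update (PySem.Set.add s a) l :=
          ih x _ (fun b hb => h b (List.mem_cons_of_mem _ hb))
      _ = x :: PySem.Set.update s (a :: l) := rfl

lemma pvSetOfList_sublist : ∀ (l : List Int) (s : PySem.Set Int),
    (PySem.Set.update s l).Sublist (s ++ l) := by
  intro l
  induction l with
  | nil => intro s; simp
  | cons a l ih =>
    intro s
    have h := ih (PySem.Set.add s a)
    have hsub : (PySem.Set.add s a ++ l).Sublist (s ++ a :: l) := by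
      by_cases hc : s.contains a = true
      · simp only [PySem.Set.add, hc, if_pos]
        exact List.Sublist.append_left (List.sublist_cons_self a l) s
      · simp only [PySem.Set.add, hc, Bool.false_eq_true, if_neg, not_false_eq_true]
        rw [List.append_assoc, List.singleton_append]
    exact List.Sublist.trans h hsub

lemma pvGroupby_sorted : ∀ (ys : List (Int × List Int)),
    ys.Pairwise (fun a b => a.1 ≤ b.1) →
    pvGroupby ys = (PySem.Set.ofList (ys.map (fun p => p.1))).map
      (fun g => (g, ys.filter (fun p => p.1 == g))) := by
  intro ys
  induction ys using pvGroupby.induct with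
  | case1 => intro _; simp [pvGroupby, PySem.Set.ofList_eq_foldl]
  | case2 x rest ih =>
    intro hpw
    have hge : ∀ p ∈ rest, x.1 ≤ p.1 := (List.pairwise_cons.mp hpw).1
    have hpw' : rest.Pairwise (fun a b => a.1 ≤ b.1) := (List.pairwise_cons.mp hpw).2
    obtain ⟨htk, hdr⟩ := pvSplit rest x.1 hpw' hge
    set tk := rest.takeWhile (fun y => y.1 == x.1) with htkdef
    set dr := rest.dropWhile (fun y => y.1 == x.1) with hdrdef
    have hsplit : tk ++ dr = rest := List.takeWhile_append_dropWhile
    have hpwdr : dr.Pairwise (fun a b => a.1 ≤ b.1) :=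
      hpw'.sublist (List.dropWhile_sublist _)
    -- distinct keys of x :: rest, in first-occurrence order
    have hof : PySem.Set.ofList ((x :: rest).map (fun p => p.1)) =
        x.1 :: PySem.Set.ofList (dr.map (fun p => p.1)) := by
      have h1 : ∀ a ∈ tk.map (fun p => p.1), ([x.1] : PySem.Set Int).contains a = true := by
        intro a ha
        obtain ⟨p, hp, rfl⟩ := List.mem_map.mp ha
        simp [htk p hp]
      have h2 : ∀ a ∈ dr.map (fun p => p.1), a ≠ x.1 := by
        intro a ha
        obtain ⟨p, hp, rfl⟩ := List.mem_map.mp ha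
        exact ne_of_gt (hdr p hp)
      have hadd : PySem.Set.add ([] : PySem.Set Int) x.1 = [x.1] := by
        simp [PySem.Set.add]
      calc PySem.Set.ofList ((x :: rest).map (fun p => p.1))
          = PySem.Set.update (PySem.Set.add [] x.1)
              (tk.map (fun p => p.1) ++ dr.map (fun p => p.1)) := by
            rw [← hsplit]; simp [PySem.Set.ofList_eq_foldl, PySem.Set.update]
        _ = PySem.Set.update (PySem.Set.update [x.1] (tk.map (fun p => p.1)))
              (dr.map (fun p => p.1)) := by
            rw [hadd, PySem.Set.update, PySem.Set.update, PySem.Set.update, List.foldl_append]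
        _ = PySem.Set.update [x.1] (dr.map (fun p => p.1)) := by
            rw [pvSetUpdate_noop (tk.map (fun p => p.1)) [x.1] h1]
        _ = x.1 :: PySem.Set.update [] (dr.map (fun p => p.1)) := pvSetUpdate_cons _ _ _ h2
        _ = x.1 :: PySem.Set.ofList (dr.map (fun p => p.1)) := by
            rw [PySem.Set.ofList_eq_foldl, PySem.Set.update]
    -- the first group is exactly the filter at x.1
    have hgrp : (x :: rest).filter (fun p => p.1 == x.1) = x :: tk := by
      rw [← hsplit, List.filter_cons, List.filter_append]
      have t1 : tk.filter (fun p => p.1 == x.1) = tk :=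
        List.filter_eq_self.mpr (fun p hp => beq_iff_eq.mpr (htk p hp))
      have t2 : dr.filter (fun p => p.1 == x.1) = [] :=
        List.filter_eq_nil_iff.mpr
          (fun p hp => by simp [beq_eq_false_iff_ne.mpr (ne_of_gt (hdr p hp))])
      simp [t1, t2]
    -- later groups only see the dropped tail
    have hfilt : ∀ g ∈ PySem.Set.ofList (dr.map (fun p => p.1)),
        (x :: rest).filter (fun p => p.1 == g) = dr.filter (fun p => p.1 == g) := by
      intro g hg
      have hgmem : g ∈ dr.map (fun p => p.1) := (PySem.Set.mem_ofList _ _).mp hg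
      obtain ⟨q, hq, rfl⟩ := List.mem_map.mp hgmem
      have hxg : x.1 ≠ q.1 := ne_of_lt (hdr q hq)
      rw [← hsplit, List.filter_cons, List.filter_append]
      have t1 : tk.filter (fun p => p.1 == q.1) = [] :=
        List.filter_eq_nil_iff.mpr (fun p hp => by
          have : p.1 = x.1 := htk p hp
          simp [this, beq_eq_false_iff_ne.mpr hxg])
      simp [beq_eq_false_iff_ne.mpr hxg, t1]
    rw [pvGroupby, ih hpwdr, hof, List.map_cons, ← hgrp]
    congr 1
    exact (List.map_congr_left (fun g hg => by rw [hfilt g hg])).symm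

lemma pvFoldStepO_some : ∀ (t : List (List Int)) (h : List Int),
    t.foldl pvStepO (some h) = some (t.foldl pvAddSleeps h) := by
  intro t
  induction t with
  | nil => intro h; rfl
  | cons s t ih => intro h; rw [List.foldl_cons, List.foldl_cons]; exact ih _

lemma pvReduceAdd_eq (ms : List (List Int)) :
    pvReduceAdd ms = (ms.foldl pvStepO none).getD [] := by
  cases ms with
  | nil => rfl
  | cons h t =>
    show t.foldl pvAddSleeps h = (t.foldl pvStepO (pvStepO none h)).getD []
    rw [show pvStepO none h = some h from rfl, pvFoldStepO_some]
    rfl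

lemma A_eq_canon (sleeps : List (Int × List Int)) :
    get_guard_sleep_totals sleeps =
      (PySem.Set.ofList ((PySem.List.sorted sleeps (fun kv => kv.1) false).map
          (fun p => p.1))).map (fun g => (g, pvVal sleeps g)) := by
  have hA : get_guard_sleep_totals sleeps =
      (pvGroupby (PySem.List.sorted sleeps (fun kv => kv.1) false)).map
        (fun gp => (gp.1, pvReduceAdd (gp.2.map (fun kv => kv.2)))) := rfl
  rw [hA, pvGroupby_sorted _ (PySem.List.sorted_pairwise sleeps (fun kv => kv.1)), List.map_map]
  refine List.map_congr_left (fun g _ => ?_)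
  simp only [Function.comp]
  refine congrArg _ ?_
  rw [pvReduceAdd_eq]
  unfold pvVal
  refine congrArg (fun o : Option (List Int) => o.getD []) ?_
  refine List.Perm.foldl_eq' ?_ (fun a _ b _ z => pvStepO_lcomm z a b) none
  exact ((PySem.List.sorted_perm sleeps (fun kv => kv.1) false).filter _).map _

lemma pvKeys_sorted (sleeps : List (Int × List Int)) :
    PySem.List.sorted (PySem.Set.ofList (sleeps.map (fun p => p.1))) (fun g => g) false =
      PySem.Set.ofList ((PySem.List.sorted sleeps (fun kv => kv.1) false).map (fun p => p.1)) := by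
  have hmapperm : ((PySem.List.sorted sleeps (fun kv => kv.1) false).map (fun p => p.1)).Perm
      (sleeps.map (fun p => p.1)) :=
    (PySem.List.sorted_perm sleeps (fun kv => kv.1) false).map _
  refine PySem.List.sorted_eq_of_perm_of_pairwise_lt _ _ _ ?_ ?_
  · refine (List.perm_ext_iff_of_nodup (PySem.Set.nodup_ofList _) (PySem.Set.nodup_ofList _)).mpr
      (fun a => ?_)
    rw [PySem.Set.mem_ofList, PySem.Set.mem_ofList]
    exact hmapperm.mem_iff
  · have hle : ((PySem.List.sorted sleeps (fun kv => kv.1) false).map (fun p => p.1)).Pairwise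
        (· ≤ ·) := PySem.List.sorted_map_key_pairwise sleeps (fun kv => kv.1)
    have hsub : (PySem.Set.ofList ((PySem.List.sorted sleeps (fun kv => kv.1) false).map
        (fun p => p.1))).Sublist
        ((PySem.List.sorted sleeps (fun kv => kv.1) false).map (fun p => p.1)) := by
      have := pvSetOfList_sublist ((PySem.List.sorted sleeps (fun kv => kv.1) false).map
        (fun p => p.1)) []
      simpa [PySem.Set.ofList_eq_foldl, PySem.Set.update] using this
    exact ((hle.sublist hsub).and (PySem.Set.nodup_ofList _)).imp
      (fun h => lt_of_le_of_ne h.1 h.2)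

-- ===== VERDICT (by name: the statement is the Claim_ definition above) =====
theorem get_guard_sleep_totals_spec : Claim_equal_get_guard_sleep_totals := by
  intro sleeps _
  unfold Spec_get_guard_sleep_totals
  rw [A_eq_canon, B_eq_canon, pvKeys_sorted]
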